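-- pv_equiv track=rewrite | github.com/lvy010/AI-exploration | AI_image/1Prompt1Story/story_generator_demo.py | circular_sliding_windows
-- ===== SOURCE A (Python) =====
-- from typing import List
--
-- def circular_sliding_windows(lst: List, w: int) -> List[List]:
--     """
--     循环滑动窗口生成
--
--     Args:
--         lst: 输入列表
--         w: 窗口大小
--
--     Returns:
--         滑动窗口列表
--     """
--     n = len(lst)
--     if n == 0:
--         return []
--
--     windows = []
--     for i in range(n):
--         window = []
--         for j in range(w):
--             window.append(lst[(i + j) % n])
--         windows.append(window)
--
--     return windows
-- ===== SOURCE B (Python) =====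
-- from typing import List
--
-- def circular_sliding_windows(lst: List, w: int) -> List[List]:
--     n = len(lst)
--     if n == 0:
--         return []
--     if w <= 0:
--         return [[] for _ in range(n)]
--     reps = (w + n - 1) // n + 1          # enough copies so that i + w <= len(extended) for every i < n
--     extended = lst * reps
--     return [extended[i:i + w] for i in range(n)]
-- ===== Notes on version B (the rewrite author's own statement) =====
-- stated objective: alternative
-- what changed: Replaces the nested modular-index loop with one concatenated list lst*reps from which each window is cut as a contiguous slice, with the empty-list and non-positive-window cases handled up front.
import Mathlib
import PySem

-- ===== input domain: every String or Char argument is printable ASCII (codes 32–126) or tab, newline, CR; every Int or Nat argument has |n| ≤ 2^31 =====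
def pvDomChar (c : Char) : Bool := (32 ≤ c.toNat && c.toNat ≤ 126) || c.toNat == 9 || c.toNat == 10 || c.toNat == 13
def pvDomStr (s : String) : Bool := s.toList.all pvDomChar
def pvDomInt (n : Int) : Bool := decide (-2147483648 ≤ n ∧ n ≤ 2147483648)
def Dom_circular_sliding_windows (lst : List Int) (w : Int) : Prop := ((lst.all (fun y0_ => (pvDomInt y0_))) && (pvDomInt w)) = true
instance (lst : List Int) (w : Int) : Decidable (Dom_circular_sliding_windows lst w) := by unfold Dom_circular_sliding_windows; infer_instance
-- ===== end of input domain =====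

-- B builds each window as a contiguous slice of a concatenated list instead of A's inner modular-index loop (alternative structure, same cost).

-- ===== PORT A =====
def circular_sliding_windows (lst : List Int) (w : Int) : List (List Int) :=
  let n : Int := lst.length
  if n = 0 then []
  else
    (PySem.List.pyRange 0 n 1).foldl (fun windows i =>
      windows ++ [(PySem.List.pyRange 0 w 1).foldl (fun window j =>
        window ++ [PySem.List.pyGetD lst (PySem.Int.mod (i + j) n) 0]) []]) []

-- ===== PORT B =====
def circular_sliding_windows_alt (lst : List Int) (w : Int) : List (List Int) :=
  let n : Int := lst.length
  if n = 0 then []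
  else if w ≤ 0 then (PySem.List.pyRange 0 n 1).map (fun _ => [])
  else
    let reps : Int := PySem.Int.floordiv (w + n - 1) n + 1
    let extended : List Int := (List.replicate reps.toNat lst).flatten   -- lst * reps
    (PySem.List.pyRange 0 n 1).map (fun i => PySem.List.slice extended (some i) (some (i + w)))

-- ===== PRECONDITION & SPEC =====
def Spec_circular_sliding_windows (lst : List Int) (w : Int) (out : List (List Int)) : Prop := out = circular_sliding_windows_alt lst w
instance (lst : List Int) (w : Int) (out : List (List Int)) : Decidable (Spec_circular_sliding_windows lst w out) := by unfold Spec_circular_sliding_windows; infer_instance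

-- ===== CLAIM (what is proved, stated in full; the proofs are below) =====
def Claim_equal_circular_sliding_windows : Prop := ∀ (lst : List Int) (w : Int), Dom_circular_sliding_windows lst w → Spec_circular_sliding_windows lst w (circular_sliding_windows lst w)

-- ===== LEMMAS AND PROOFS =====

theorem flat_rep_get? (lst : List Int) (r m : Nat) (hm : m < r * lst.length) :
    (List.replicate r lst).flatten[m]? = lst[m % lst.length]? := by
  induction r generalizing m with
  | zero => omega
  | succ r ih =>
      rw [Nat.succ_mul] at hm
      rw [List.replicate_succ, List.flatten_cons]
      by_cases h : m < lst.length
      · rw [List.getElem?_append_left h, Nat.mod_eq_of_lt h]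
      · rw [not_lt] at h
        rw [List.getElem?_append_right h, ih (m - lst.length) (by omega),
            Nat.mod_eq_sub_mod h]

theorem circular_sliding_windows_spec : Claim_equal_circular_sliding_windows := by
  intro lst w _
  unfold Spec_circular_sliding_windows circular_sliding_windows circular_sliding_windows_alt
  by_cases hn : (lst.length : Int) = 0
  · simp [hn]
  · have hn0 : 0 < lst.length := by omega
    simp only [if_neg hn]
    by_cases hw : w ≤ 0
    · simp only [if_pos hw]
      rw [PySem.List.foldl_append_singleton_eq_map]
      apply List.map_congr_left
      intro i _
      simp [PySem.List.pyRange_one_eq_nil hw]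
    · simp only [if_neg hw]
      rw [PySem.List.foldl_append_singleton_eq_map]
      apply List.map_congr_left
      intro i hi
      rw [PySem.List.mem_pyRange_one] at hi
      obtain ⟨k, rfl⟩ : ∃ k : Nat, i = (k : Int) := ⟨i.toNat, (Int.toNat_of_nonneg hi.1).symm⟩
      have hk : k < lst.length := by exact_mod_cast hi.2
      rw [PySem.List.foldl_append_singleton_eq_map]
      rw [not_le] at hw
      obtain ⟨W, rfl⟩ : ∃ W : Nat, w = (W : Int) := ⟨w.toNat, (Int.toNat_of_nonneg (le_of_lt hw)).symm⟩
      have hW : 0 < W := by exact_mod_cast hw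
      set n := lst.length with hnd
      -- reps as a Nat
      have hcast : (W : Int) + (n : Int) - 1 = ((W + n - 1 : Nat) : Int) := by omega
      rw [hcast, PySem.Int.floordiv_natCast]
      have hrcast : (((W + n - 1) / n : Nat) : Int) + 1 = (((W + n - 1) / n + 1 : Nat) : Int) := by push_cast; ring
      rw [hrcast, Int.toNat_natCast]
      set R := (W + n - 1) / n + 1 with hRd
      have hd := Nat.div_add_mod (W + n - 1) n
      have hm := Nat.mod_lt (W + n - 1) hn0
      have hRn : R * n = n * ((W + n - 1) / n) + n := by rw [hRd]; ring
      have hbound : k + W ≤ R * n := by omega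
      have hbound' : k + W ≤ R * lst.length := by rw [← hnd]; exact hbound
      -- the slice is a drop/take
      have hkw : (k : Int) + (W : Int) = ((k + W : Nat) : Int) := by push_cast; ring
      rw [hkw, PySem.List.slice_natCast]
      have htake : k + W - k = W := by omega
      rw [htake]
      -- both sides elementwise
      rw [PySem.List.pyRange_one]
      rw [List.map_map]
      apply List.ext_getElem?
      intro t
      have hW0 : ((W : Int) - 0).toNat = W := by simp
      simp only [List.nil_append, hW0]
      by_cases htW : t < W
      · rw [List.getElem?_map, List.getElem?_range htW]
        rw [List.getElem?_take_of_lt htW, List.getElem?_drop]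
        rw [flat_rep_get? lst R (k + t) (by omega)]
        have hmod : (k + t) % lst.length < lst.length := Nat.mod_lt _ hn0
        simp only [Option.map_some, Function.comp_apply]
        rw [show ((k : Int) + (0 + (t : Int))) = ((k + t : Nat) : Int) by push_cast; ring]
        rw [PySem.Int.mod_natCast, PySem.List.pyGetD_natCast]
        rw [List.getElem?_eq_getElem hmod]
        congr 1
        exact List.getD_eq_getElem lst 0 hmod
      · rw [not_lt] at htW
        rw [List.getElem?_eq_none (by simpa using htW),
            List.getElem?_eq_none (by simp; omega)]
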